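-- pv_equiv track=rewrite | github.com/alelom/python-package-folder | src/python_package_folder/subfolder_build.py | _inject_exclude_patterns
-- ===== SOURCE A (Python) =====
-- def _inject_exclude_patterns(content: str, exclude_patterns: list[str]) -> str:
--     """
--     Inject exclude patterns into pyproject.toml content.
--
--     Adds or updates [tool.python-package-folder] exclude-patterns section.
--
--     Args:
--         content: pyproject.toml content
--         exclude_patterns: List of exclude patterns to inject
--
--     Returns:
--         Modified pyproject.toml content with exclude patterns
--     """
--     if not exclude_patterns:
--         return content
--
--     lines = content.split("\n")
--     result = []
--     tool_section_exists = False
--     tool_section_index = -1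
--     tool_section_end = -1
--
--     # Find [tool.python-package-folder] section
--     for i, line in enumerate(lines):
--         if line.strip() == "[tool.python-package-folder]":
--             tool_section_exists = True
--             tool_section_index = i
--             # Find end of section
--             for j in range(i + 1, len(lines)):
--                 if lines[j].strip().startswith("["):
--                     tool_section_end = j
--                     break
--             if tool_section_end == -1:
--                 tool_section_end = len(lines)
--             break
--
--     if tool_section_exists:
--         # Update existing section
--         patterns_str = ", ".join(f'"{p}"' for p in exclude_patterns)
--         has_exclude_patterns = False
--         for i in range(tool_section_index + 1, tool_section_end):
--             if "exclude-patterns" in lines[i]: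
--                 # Update existing line
--                 lines[i] = f'exclude-patterns = [{patterns_str}]'
--                 has_exclude_patterns = True
--                 break
--         if not has_exclude_patterns:
--             # Add exclude-patterns to existing section
--             lines.insert(tool_section_end, f'exclude-patterns = [{patterns_str}]')
--         return "\n".join(lines)
--     else:
--         # Add new section at the end
--         patterns_str = ", ".join(f'"{p}"' for p in exclude_patterns)
--         lines.append("")
--         lines.append("[tool.python-package-folder]")
--         lines.append(f'exclude-patterns = [{patterns_str}]')
--         return "\n".join(lines)
-- ===== SOURCE B (Python) =====
-- def _inject_exclude_patterns(content: str, exclude_patterns: list[str]) -> str: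
--     """Single linear pass over the lines with a small state machine."""
--     if not exclude_patterns:
--         return content
--
--     new_line = 'exclude-patterns = [' + ", ".join(f'"{p}"' for p in exclude_patterns) + ']'
--     out = []
--     state = 0  # 0 = section not seen yet, 1 = inside section, 2 = handled
--     for line in content.split("\n"):
--         if state == 0:
--             out.append(line)
--             if line.strip() == "[tool.python-package-folder]":
--                 state = 1
--         elif state == 1:
--             if line.strip().startswith("["):
--                 out.append(new_line)
--                 out.append(line)
--                 state = 2
--             elif "exclude-patterns" in line:
--                 out.append(new_line)
--                 state = 2
--             else:
--                 out.append(line)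
--         else:
--             out.append(line)
--     if state == 0:
--         out.extend(["", "[tool.python-package-folder]", new_line])
--     elif state == 1:
--         out.append(new_line)
--     return "\n".join(out)
-- ===== Notes on version B (the rewrite author's own statement) =====
-- stated objective: simpler
-- what changed: Replaced A's index-based control flow (enumerate scan for the header, a range() scan for the section end, a second range() scan with lines[i] lookups, plus in-place assignment/list.insert) by one linear pass over the split lines with a three-state machine that emits the result list directly.
import Mathlib
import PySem

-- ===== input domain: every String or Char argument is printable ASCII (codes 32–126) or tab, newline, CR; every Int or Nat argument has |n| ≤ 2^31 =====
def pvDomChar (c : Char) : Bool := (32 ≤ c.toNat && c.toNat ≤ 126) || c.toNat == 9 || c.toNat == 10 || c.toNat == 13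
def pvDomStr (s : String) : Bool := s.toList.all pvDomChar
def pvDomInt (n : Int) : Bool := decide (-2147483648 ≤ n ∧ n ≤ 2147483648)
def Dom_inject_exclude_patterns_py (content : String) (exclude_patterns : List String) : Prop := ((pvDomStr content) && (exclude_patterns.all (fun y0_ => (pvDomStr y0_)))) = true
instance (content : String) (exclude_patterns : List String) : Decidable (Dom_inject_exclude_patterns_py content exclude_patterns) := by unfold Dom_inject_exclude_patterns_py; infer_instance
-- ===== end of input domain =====

-- B replaces A's three index-based scans (enumerate + two range() passes with
-- lines[i] lookups, plus list.insert / in-place assignment) by a single linear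
-- state-machine pass over the lines; objective: simpler.

-- ===== PORT A =====
-- shared literal helpers (the section header and the formatted patterns line of the Python source)
def pvHdr : String := "[tool.python-package-folder]"

def pvPatternsStr (ps : List String) : String :=
  PySem.Str.join ", " (ps.map fun p => "\"" ++ p ++ "\"")

def pvBrk (l : String) : Bool := PySem.Str.startswith (PySem.Str.strip l) "["
def pvPat (l : String) : Bool := PySem.Str.isIn "exclude-patterns" l

-- A's outer 'for i, line in enumerate(lines)' with break on the first header line
def pvFindHdr (i : Nat) : List String → Option Nat
  | [] => none
  | line :: rest =>
    if PySem.Str.strip line == pvHdr then some i else pvFindHdr (i + 1) rest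

-- A's two inner 'for j in range(a, b): if p(lines[j]): break' scans
def pvFindIdx (p : String → Bool) (lines : List String) : List Int → Option Int
  | [] => none
  | j :: rest =>
    if p (PySem.List.pyGetD lines j "") then some j else pvFindIdx p lines rest

def inject_exclude_patterns_py (content : String) (exclude_patterns : List String) : String :=
  if exclude_patterns = [] then content
  else
    let lines := (PySem.Str.split? content "\n").getD []
    match pvFindHdr 0 lines with
    | some idx =>
        -- end of section: first j in range(idx+1, len(lines)) whose strip startswith "[", else -1 → len
        let e : Int := (pvFindIdx pvBrk lines
          (PySem.List.pyRange ((idx : Int) + 1) (lines.length : Int))).getD (-1)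
        let tend : Int := if e = -1 then (lines.length : Int) else e
        let newline := "exclude-patterns = [" ++ pvPatternsStr exclude_patterns ++ "]"
        match pvFindIdx pvPat lines (PySem.List.pyRange ((idx : Int) + 1) tend) with
        | some i => PySem.Str.join "\n" (PySem.List.pySetD lines i newline)
        | none => PySem.Str.join "\n" (PySem.List.insert lines tend newline)
    | none =>
        let newline := "exclude-patterns = [" ++ pvPatternsStr exclude_patterns ++ "]"
        PySem.Str.join "\n" (lines ++ ["", pvHdr, newline])

-- ===== PORT B =====
-- one fold step of B's state machine: state 0 = header not seen, 1 = inside section, 2 = handled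
def pvStep (newline : String) (acc : List String × Nat) (line : String) : List String × Nat :=
  if acc.2 = 0 then
    (acc.1 ++ [line], if PySem.Str.strip line == pvHdr then 1 else 0)
  else if acc.2 = 1 then
    if pvBrk line then (acc.1 ++ [newline, line], 2)
    else if pvPat line then (acc.1 ++ [newline], 2)
    else (acc.1 ++ [line], 1)
  else (acc.1 ++ [line], acc.2)

def inject_exclude_patterns_py_alt (content : String) (exclude_patterns : List String) : String :=
  if exclude_patterns = [] then content
  else
    let newline := "exclude-patterns = [" ++ pvPatternsStr exclude_patterns ++ "]"
    let r := ((PySem.Str.split? content "\n").getD []).foldl (pvStep newline) ([], 0)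
    let out :=
      if r.2 = 0 then r.1 ++ ["", pvHdr, newline]
      else if r.2 = 1 then r.1 ++ [newline]
      else r.1
    PySem.Str.join "\n" out

-- ===== PRECONDITION & SPEC =====
def Spec_inject_exclude_patterns_py (content : String) (exclude_patterns : List String) (out : String) : Prop := out = inject_exclude_patterns_py_alt content exclude_patterns
instance (content : String) (exclude_patterns : List String) (out : String) : Decidable (Spec_inject_exclude_patterns_py content exclude_patterns out) := by unfold Spec_inject_exclude_patterns_py; infer_instance

-- ===== CLAIM (what is proved, stated in full; the proofs are below) =====
def Claim_equal_inject_exclude_patterns_py : Prop := ∀ (content : String) (exclude_patterns : List String), Dom_inject_exclude_patterns_py content exclude_patterns → Spec_inject_exclude_patterns_py content exclude_patterns (inject_exclude_patterns_py content exclude_patterns)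

-- ===== LEMMAS AND PROOFS =====

-- the output B produces for the lines strictly after the first header line
def pvSect (nl : String) : List String → List String
  | [] => [nl]
  | l :: ls =>
    if pvBrk l then nl :: l :: ls
    else if pvPat l then nl :: ls
    else l :: pvSect nl ls

theorem pvFindHdr_none {lines : List String} {i : Nat}
    (h : pvFindHdr i lines = none) : ∀ l ∈ lines, (PySem.Str.strip l == pvHdr) = false := by
  induction lines generalizing i with
  | nil => simp
  | cons a t ih =>
    intro l hl
    unfold pvFindHdr at h
    by_cases ha : (PySem.Str.strip a == pvHdr) = true
    · simp [ha] at h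
    · rw [if_neg ha] at h
      rcases List.mem_cons.mp hl with rfl | hl
      · simpa using ha
      · exact ih h l hl

theorem pvFindHdr_some {lines : List String} {i idx : Nat}
    (h : pvFindHdr i lines = some idx) :
    ∃ pre hd rest, lines = pre ++ hd :: rest ∧ i + pre.length = idx ∧
      (∀ l ∈ pre, (PySem.Str.strip l == pvHdr) = false) ∧
      (PySem.Str.strip hd == pvHdr) = true := by
  induction lines generalizing i with
  | nil => simp [pvFindHdr] at h
  | cons a t ih =>
    unfold pvFindHdr at h
    by_cases ha : (PySem.Str.strip a == pvHdr) = true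
    · rw [if_pos ha] at h
      injection h with h
      exact ⟨[], a, t, by simp, by simpa using h, fun l hl => by simp at hl, ha⟩
    · rw [if_neg ha] at h
      obtain ⟨pre, hd, rest, hsplit, hlen, hpre, hhd⟩ := ih h
      refine ⟨a :: pre, hd, rest, by simp [hsplit], by simp; omega, ?_, hhd⟩
      intro l hl
      rcases List.mem_cons.mp hl with rfl | hl
      · simpa using ha
      · exact hpre l hl

theorem pvFindIdx_range (p : String → Bool) (lines : List String) (n : Nat)
    (hn : n ≤ lines.length) :
    ∀ (m k : Nat), k + m = n →
      pvFindIdx p lines (PySem.List.pyRange (k : Int) (n : Int)) =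
        (((lines.take n).drop k).findIdx? p).map (fun d => ((k + d : Nat) : Int)) := by
  intro m
  induction m with
  | zero =>
    intro k hk
    have hkn : k = n := by omega
    subst hkn
    have h1 : PySem.List.pyRange (k : Int) (k : Int) = [] := by
      simp [PySem.List.pyRange]
    have h2 : (lines.take k).drop k = [] := by
      apply List.drop_eq_nil_of_le; simp
    simp [h1, h2, pvFindIdx]
  | succ m ih =>
    intro k hk
    have hklt : k < n := by omega
    have hkl : k < lines.length := by omega
    rw [PySem.List.pyRange_one_cons (by exact_mod_cast hklt)]
    unfold pvFindIdx
    have hget : PySem.List.pyGetD lines (k : Int) "" = lines[k] := by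
      rw [PySem.List.pyGetD_natCast]
      exact List.getD_eq_getElem _ _ hkl
    have hklt' : k < (lines.take n).length := by simp; omega
    have hdrop : (lines.take n).drop k = lines[k] :: (lines.take n).drop (k + 1) := by
      rw [List.drop_eq_getElem_cons hklt', List.getElem_take]
    rw [hget, hdrop, List.findIdx?_cons]
    by_cases hp : p lines[k] = true
    · simp [hp]
    · rw [if_neg hp, if_neg hp]
      have : ((k : Int) + 1) = ((k + 1 : Nat) : Int) := by push_cast; ring
      rw [this, ih (k + 1) (by omega)]
      cases hfi : ((lines.take n).drop (k + 1)).findIdx? p with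
      | none => simp
      | some d => simp; omega

theorem pvSect_eq (nl : String) (rest : List String) :
    (match rest.findIdx? pvBrk with
     | none =>
       match rest.findIdx? pvPat with
       | some d => rest.set d nl
       | none => rest ++ [nl]
     | some db =>
       match (rest.take db).findIdx? pvPat with
       | some d => rest.set d nl
       | none => rest.take db ++ nl :: rest.drop db)
    = pvSect nl rest := by
  induction rest with
  | nil => simp [pvSect]
  | cons l ls ih =>
    by_cases hb : pvBrk l = true
    · simp [List.findIdx?_cons, hb, pvSect]
    · by_cases hp : pvPat l = true
      · rw [List.findIdx?_cons, if_neg hb]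
        cases hfb : ls.findIdx? pvBrk with
        | none => simp [List.findIdx?_cons, hp, pvSect, hb]
        | some db => simp [List.findIdx?_cons, hp, pvSect, hb]
      · rw [List.findIdx?_cons, if_neg hb]
        unfold pvSect
        rw [if_neg hb, if_neg hp]
        cases hfb : ls.findIdx? pvBrk with
        | none =>
          rw [← ih, hfb]
          rw [List.findIdx?_cons, if_neg hp]
          cases hfp : ls.findIdx? pvPat with
          | none => simp
          | some d => simp
        | some db =>
          rw [← ih, hfb]
          simp only [Option.map_some, List.take_succ_cons, List.findIdx?_cons, if_neg hp]
          cases hfp : (ls.take db).findIdx? pvPat with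
          | none => simp
          | some d => simp

theorem pvFoldl_state2 (nl : String) (l : List String) (out : List String) :
    l.foldl (pvStep nl) (out, 2) = (out ++ l, 2) := by
  induction l generalizing out with
  | nil => simp
  | cons a t ih => simp [List.foldl_cons, pvStep, ih]

theorem pvFoldl_state0 (nl : String) {l : List String}
    (h : ∀ x ∈ l, (PySem.Str.strip x == pvHdr) = false) (out : List String) :
    l.foldl (pvStep nl) (out, 0) = (out ++ l, 0) := by
  induction l generalizing out with
  | nil => simp
  | cons a t ih =>
    have ha := h a (by simp)
    rw [List.foldl_cons]
    have hstep : pvStep nl (out, 0) a = (out ++ [a], 0) := by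
      simp [pvStep, ha]
    rw [hstep, ih (fun x hx => h x (by simp [hx])) (out ++ [a])]
    simp

def pvFinish (nl : String) (r : List String × Nat) : List String :=
  if r.2 = 0 then r.1 ++ ["", pvHdr, nl]
  else if r.2 = 1 then r.1 ++ [nl]
  else r.1

theorem pvFoldl_state1 (nl : String) (l : List String) (out : List String) :
    pvFinish nl (l.foldl (pvStep nl) (out, 1)) = out ++ pvSect nl l := by
  induction l generalizing out with
  | nil => simp [pvFinish, pvSect]
  | cons a t ih =>
    rw [List.foldl_cons]
    by_cases hb : pvBrk a = true
    · have hstep : pvStep nl (out, 1) a = (out ++ [nl, a], 2) := by simp [pvStep, hb]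
      rw [hstep, pvFoldl_state2]
      simp [pvFinish, pvSect, hb]
    · by_cases hp : pvPat a = true
      · have hstep : pvStep nl (out, 1) a = (out ++ [nl], 2) := by simp [pvStep, hb, hp]
        rw [hstep, pvFoldl_state2]
        simp [pvFinish, pvSect, hb, hp]
      · have hstep : pvStep nl (out, 1) a = (out ++ [a], 1) := by simp [pvStep, hb, hp]
        rw [hstep, ih (out ++ [a])]
        simp [pvSect, hb, hp]

-- core equality on the split lines, for arbitrary lines and newline
theorem pvCore_eq (nl : String) (lines : List String) :
    (match pvFindHdr 0 lines with
     | some idx =>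
        let e : Int := (pvFindIdx pvBrk lines
          (PySem.List.pyRange ((idx : Int) + 1) (lines.length : Int))).getD (-1)
        let tend : Int := if e = -1 then (lines.length : Int) else e
        match pvFindIdx pvPat lines (PySem.List.pyRange ((idx : Int) + 1) tend) with
        | some i => PySem.Str.join "\n" (PySem.List.pySetD lines i nl)
        | none => PySem.Str.join "\n" (PySem.List.insert lines tend nl)
     | none => PySem.Str.join "\n" (lines ++ ["", pvHdr, nl]))
    = PySem.Str.join "\n" (pvFinish nl (lines.foldl (pvStep nl) ([], 0))) := by
  cases hf : pvFindHdr 0 lines with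
  | none =>
    have hall := pvFindHdr_none hf
    rw [pvFoldl_state0 nl hall []]
    simp [pvFinish]
  | some idx =>
    obtain ⟨pre, hd, rest, hsplit, hlen, hpre, hhd⟩ := pvFindHdr_some hf
    simp only [Nat.zero_add] at hlen
    subst hsplit
    dsimp only []
    -- B side
    rw [show pre ++ hd :: rest = (pre ++ [hd]) ++ rest by simp, List.foldl_append,
      List.foldl_append, pvFoldl_state0 nl hpre []]
    simp only [List.foldl_cons, List.foldl_nil]
    have hstep : pvStep nl ([] ++ pre, 0) hd = (pre ++ [hd], 1) := by
      simp [pvStep, hhd]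
    rw [hstep, pvFoldl_state1]
    -- A side
    have hL : ((pre ++ [hd]) ++ rest).length = idx + 1 + rest.length := by simp; omega
    have hpre1 : (pre ++ [hd]).length = idx + 1 := by simp [hlen]
    have hidx1 : ((idx : Int) + 1) = ((idx + 1 : Nat) : Int) := by push_cast; ring
    have hdropA : (((pre ++ [hd]) ++ rest).take ((pre ++ [hd]) ++ rest).length).drop (idx + 1)
        = rest := by
      rw [List.take_length, ← hpre1, List.drop_left]
    rw [← pvSect_eq nl rest]
    have hbrk := pvFindIdx_range pvBrk ((pre ++ [hd]) ++ rest) ((pre ++ [hd]) ++ rest).length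
      (le_refl _) rest.length (idx + 1) (by omega)
    rw [hdropA] at hbrk
    rw [hidx1, hbrk]
    cases hfb : rest.findIdx? pvBrk with
    | none =>
      -- tend = len(lines)
      simp only [Option.map_none, Option.getD_none, if_true]
      have hpat := pvFindIdx_range pvPat ((pre ++ [hd]) ++ rest) ((pre ++ [hd]) ++ rest).length
        (le_refl _) rest.length (idx + 1) (by omega)
      rw [hdropA] at hpat
      rw [hpat]
      cases hfp : rest.findIdx? pvPat with
      | none =>
        simp only [Option.map_none]
        rw [PySem.List.insert_natCast _ _ _ (le_refl _), List.take_length, List.drop_length]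
        simp
      | some d =>
        simp only [Option.map_some]
        rw [PySem.List.pySetD_natCast]
        rw [List.set_append, if_neg (by rw [hpre1]; omega), hpre1,
          show idx + 1 + d - (idx + 1) = d by omega]
    | some db =>
      have hdb : db < rest.length := (List.findIdx?_eq_some_iff_findIdx_eq.mp hfb).1
      simp only [Option.map_some, Option.getD_some]
      rw [if_neg (by omega)]
      have hn2 : idx + 1 + db ≤ ((pre ++ [hd]) ++ rest).length := by omega
      have hpat := pvFindIdx_range pvPat ((pre ++ [hd]) ++ rest) (idx + 1 + db)
        hn2 db (idx + 1) (by omega)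
      have htake : (((pre ++ [hd]) ++ rest).take (idx + 1 + db)).drop (idx + 1)
          = rest.take db := by
        rw [List.take_append, List.take_of_length_le (by omega), hpre1,
          show idx + 1 + db - (idx + 1) = db by omega, List.drop_left' hpre1]
      rw [htake] at hpat
      rw [hpat]
      cases hfp : (rest.take db).findIdx? pvPat with
      | none =>
        simp only [Option.map_none]
        rw [PySem.List.insert_natCast _ _ _ hn2]
        rw [List.take_append, List.take_of_length_le (by omega), hpre1,
          show idx + 1 + db - (idx + 1) = db by omega]
        rw [List.drop_append, List.drop_eq_nil_of_le (by omega), hpre1,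
          show idx + 1 + db - (idx + 1) = db by omega]
        simp
      | some d =>
        simp only [Option.map_some]
        rw [PySem.List.pySetD_natCast]
        rw [List.set_append, if_neg (by rw [hpre1]; omega), hpre1,
          show idx + 1 + d - (idx + 1) = d by omega]

-- ===== VERDICT (by name: the statement is the Claim_ definition above) =====
theorem inject_exclude_patterns_py_spec : Claim_equal_inject_exclude_patterns_py := by
  intro content exclude_patterns _
  unfold Spec_inject_exclude_patterns_py inject_exclude_patterns_py inject_exclude_patterns_py_alt
  by_cases hps : exclude_patterns = []
  · rw [if_pos hps, if_pos hps]
  · rw [if_neg hps, if_neg hps]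
    exact pvCore_eq _ _
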